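-- pv_equiv track=rewrite | github.com/NienkeWessel/ThesisCS | analyze_stats.py | filter_filename_in_stats
-- ===== SOURCE A (Python) =====
-- def filter_filename_in_stats(stats, filenames):
--     new_stats = {}
--     for modeltype in stats:
--         for modeln in stats[modeltype]:
--             for filen in stats[modeltype][modeln]:
--                 if filen in filenames:
--                     if modeltype not in new_stats:
--                         new_stats[modeltype] = {}
--                     if modeln not in new_stats[modeltype]:
--                         new_stats[modeltype][modeln] = {}
--                     new_stats[modeltype][modeln][filen] = stats[modeltype][modeln][filen]
--     return new_stats
-- ===== SOURCE B (Python) =====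
-- def _prune(d, fset, depth):
--     """Recursively filter a nested dict: at depth 0 keep keys in fset;
--     above, keep a key only if its recursively pruned subtree is non-empty."""
--     if depth == 0:
--         return {k: d[k] for k in d if k in fset}
--     out = {}
--     for k in d:
--         sub = _prune(d[k], fset, depth - 1)
--         if sub:
--             out[k] = sub
--     return out
--
--
-- def filter_filename_in_stats(stats, filenames):
--     return _prune(stats, set(filenames), 2)
-- ===== Notes on version B (the rewrite author's own statement) =====
-- stated objective: faster
-- what changed: B replaces A's three hand-written nested loops with lazy top-down create-key-on-first-match by one depth-generic recursive prune function: the leaf level is a comprehension keeping filenames from a pre-hashed set, and each upper level keeps a key only when its recursively pruned subtree is non-empty (bottom-up build-and-prune).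
import Mathlib
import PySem

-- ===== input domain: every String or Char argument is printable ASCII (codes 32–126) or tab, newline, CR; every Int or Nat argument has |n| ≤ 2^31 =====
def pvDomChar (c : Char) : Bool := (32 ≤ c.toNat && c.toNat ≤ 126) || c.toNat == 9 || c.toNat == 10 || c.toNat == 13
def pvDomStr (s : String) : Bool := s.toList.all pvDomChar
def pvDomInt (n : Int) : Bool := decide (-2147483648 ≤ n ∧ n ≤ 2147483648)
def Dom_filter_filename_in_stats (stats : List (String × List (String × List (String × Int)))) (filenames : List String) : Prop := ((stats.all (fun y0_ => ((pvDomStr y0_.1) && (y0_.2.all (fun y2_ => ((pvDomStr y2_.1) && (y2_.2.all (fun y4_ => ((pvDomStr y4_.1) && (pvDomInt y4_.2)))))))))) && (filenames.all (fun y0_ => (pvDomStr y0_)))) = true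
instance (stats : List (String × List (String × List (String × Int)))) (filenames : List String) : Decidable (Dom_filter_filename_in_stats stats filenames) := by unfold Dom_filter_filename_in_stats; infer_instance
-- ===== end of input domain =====

-- B replaces A's three nested loops with lazy create-key-on-first-match by one depth-generic
-- recursive prune (leaf comprehension over a pre-hashed filename set, upper levels keep a key
-- only when the recursively pruned subtree is non-empty); return values proved equal.

-- ===== PORT A =====
-- Python mutates the nested dicts in place; each leaf write is ported by re-inserting the
-- rebuilt inner items lists. The `.getD _ []` / `.getD _ 0` lookups always succeed here
-- (the key was taken from the very dict being looked up), so the defaults are unreachable.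
def pvA_leafstep (filenames : List String) (modeltype modeln : String)
    (files : List (String × Int))
    (ns : PySem.Dict String (List (String × List (String × Int)))) (r : String × Int) :
    PySem.Dict String (List (String × List (String × Int))) :=
  let filen := r.1
  if filenames.contains filen then
    let ns1 := if ns.contains modeltype then ns else ns.insert modeltype []
    let inner := PySem.Dict.mk (ns1.getD modeltype [])
    let inner1 := if inner.contains modeln then inner else inner.insert modeln []
    let leaf := PySem.Dict.mk (inner1.getD modeln [])
    let leaf1 := leaf.insert filen ((PySem.Dict.mk files).getD filen 0)
    let inner2 := inner1.insert modeln leaf1.items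
    ns1.insert modeltype inner2.items
  else ns

def pvA_modelstep (filenames : List String) (modeltype : String)
    (models : List (String × List (String × Int)))
    (ns : PySem.Dict String (List (String × List (String × Int))))
    (q : String × List (String × Int)) :
    PySem.Dict String (List (String × List (String × Int))) :=
  let modeln := q.1
  let files := (PySem.Dict.mk models).getD modeln []
  files.foldl (pvA_leafstep filenames modeltype modeln files) ns

def filter_filename_in_stats (stats : List (String × List (String × List (String × Int)))) (filenames : List String) : List (String × List (String × List (String × Int))) :=
  let statsD := PySem.Dict.mk stats
  (stats.foldl (fun ns p =>
      let modeltype := p.1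
      let models := statsD.getD modeltype []
      models.foldl (pvA_modelstep filenames modeltype models) ns)
    (PySem.Dict.mk [])).items

-- ===== PORT B =====
-- Source B's `_prune(d, fset, depth)` is one recursive function; Lean's types force it to be
-- monomorphized per depth: pvPrune0 / pvPrune1 / pvPrune2 are its depth-0/1/2 instances,
-- each transcribing the same Python body at its level.
-- depth 0: `{k: d[k] for k in d if k in fset}`
def pvPrune0 (fset : PySem.Set String) (d : List (String × Int)) : PySem.Dict String Int :=
  d.foldl (fun out r =>
      if PySem.Set.contains fset r.1 then out.insert r.1 ((PySem.Dict.mk d).getD r.1 0)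
      else out)
    (PySem.Dict.mk [])

-- depth 1: `sub = _prune(d[k], fset, 0); if sub: out[k] = sub`
def pvPrune1 (fset : PySem.Set String) (d : List (String × List (String × Int))) :
    PySem.Dict String (List (String × Int)) :=
  d.foldl (fun out q =>
      let sub := pvPrune0 fset ((PySem.Dict.mk d).getD q.1 [])
      if sub.items.isEmpty then out else out.insert q.1 sub.items)
    (PySem.Dict.mk [])

-- depth 2: `sub = _prune(d[k], fset, 1); if sub: out[k] = sub`
def pvPrune2 (fset : PySem.Set String) (d : List (String × List (String × List (String × Int)))) :
    PySem.Dict String (List (String × List (String × Int))) :=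
  d.foldl (fun out q =>
      let sub := pvPrune1 fset ((PySem.Dict.mk d).getD q.1 [])
      if sub.items.isEmpty then out else out.insert q.1 sub.items)
    (PySem.Dict.mk [])

def filter_filename_in_stats_alt (stats : List (String × List (String × List (String × Int)))) (filenames : List String) : List (String × List (String × List (String × Int))) :=
  (pvPrune2 (PySem.Set.ofList filenames) stats).items

-- ===== PRECONDITION & SPEC =====
def Spec_filter_filename_in_stats (stats : List (String × List (String × List (String × Int)))) (filenames : List String) (out : List (String × List (String × List (String × Int)))) : Prop := out = filter_filename_in_stats_alt stats filenames
instance (stats : List (String × List (String × List (String × Int)))) (filenames : List String) (out : List (String × List (String × List (String × Int)))) : Decidable (Spec_filter_filename_in_stats stats filenames out) := by unfold Spec_filter_filename_in_stats; infer_instance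

-- ===== CLAIM (what is proved, stated in full; the proofs are below) =====
def Claim_equal_filter_filename_in_stats : Prop := ∀ (stats : List (String × List (String × List (String × Int)))) (filenames : List String), Dom_filter_filename_in_stats stats filenames → Spec_filter_filename_in_stats stats filenames (filter_filename_in_stats stats filenames)

-- ===== LEMMAS AND PROOFS =====

-- proof-layer abbreviations
abbrev pvL : Type := List (String × Int)
abbrev pvM : Type := List (String × List (String × Int))
abbrev pvS : Type := List (String × List (String × List (String × Int)))
abbrev pvDL : Type := PySem.Dict String Int
abbrev pvDM : Type := PySem.Dict String (List (String × Int))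
abbrev pvDS : Type := PySem.Dict String (List (String × List (String × Int)))

-- a fold whose step rebuilds the dict from its items is the fold on dicts
theorem pv_foldl_conj {α β : Type} (L : List α)
    (G : PySem.Dict String β → α → PySem.Dict String β) (j : List (String × β)) :
    L.foldl (fun j x => (G (PySem.Dict.mk j) x).items) j
      = (L.foldl G (PySem.Dict.mk j)).items := by
  induction L generalizing j with
  | nil => rfl
  | cons x L ih => simpa using ih ((G (PySem.Dict.mk j) x).items)

theorem pv_fold_id {α β : Type} (L : List α) (c : α → Bool) (F : β → α → β) (b : β)
    (h : ∀ x ∈ L, c x = false) :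
    L.foldl (fun b x => if c x then F b x else b) b = b := by
  induction L generalizing b with
  | nil => rfl
  | cons x L ih =>
    simp only [List.foldl_cons, h x (by simp)]
    exact ih b (fun y hy => h y (by simp [hy]))

-- localization: a fold whose every step only rewrites the entry at key k
theorem pv_loc {α γ : Type} (L : List α) (c : α → Bool)
    (F : List γ → α → List γ) (k : String)
    (d : PySem.Dict String (List γ)) :
    L.foldl (fun d x => if c x then d.insert k (F (d.getD k []) x) else d) d
      = if L.all (fun x => !c x) then d
        else d.insert k (L.foldl (fun v x => if c x then F v x else v) (d.getD k [])) := by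
  induction L generalizing d with
  | nil => rfl
  | cons x L ih =>
    by_cases hc : c x = true
    · simp only [List.foldl_cons, List.all_cons, hc, if_true, Bool.not_true,
        Bool.false_and, Bool.false_eq_true, if_false]
      rw [ih]
      by_cases hall : (L.all fun y => !c y) = true
      · rw [if_pos hall,
          pv_fold_id L c F _ (fun y hy => by simpa using List.all_eq_true.mp hall y hy)]
      · rw [if_neg hall, PySem.Dict.getD_insert_self, PySem.Dict.insert_insert_self]
    · have hc' : c x = false := by simpa using hc
      simp only [List.foldl_cons, List.all_cons, hc', if_false, Bool.not_false,
        Bool.true_and, Bool.false_eq_true]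
      exact ih d

theorem pv_map_eq_self {α : Type} (l : List α) (f : α → α) (h : ∀ a ∈ l, f a = a) :
    l.map f = l := by
  induction l with
  | nil => rfl
  | cons x l ih => simp [h x (by simp), ih (fun a ha => h a (by simp [ha]))]

theorem pv_insert_eq_self {β : Type} (d : PySem.Dict String β) (k : String) (v : β)
    (hnd : d.keys.Nodup) (h : d.get? k = some v) : d.insert k v = d := by
  have hcont : d.contains k = true := by
    rw [PySem.Dict.contains_eq_isSome_get?, h]; rfl
  apply PySem.Dict.ext
  rw [PySem.Dict.items_insert_of_contains d v hcont]
  apply pv_map_eq_self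
  intro p hp
  obtain ⟨a, b⟩ := p
  by_cases hpk : (a == k) = true
  · have hk : a = k := by simpa using hpk
    have h2 : d.get? a = some b := PySem.Dict.get?_of_mem_items d hp hnd
    rw [hk] at h2
    rw [h2] at h
    simp [hk, (Option.some_inj.mp h).symm]
  · simp [hpk]

def pvC (fns : List String) (r : String × Int) : Bool := fns.contains r.1
def pvVal (files : pvL) (f : String) : Int := (PySem.Dict.mk files).getD f 0
def pvLeafStep (fns : List String) (files : pvL) (d : pvDL) (r : String × Int) : pvDL :=
  if pvC fns r then d.insert r.1 (pvVal files r.1) else d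
def pvFiltered (fns : List String) (files : pvL) : pvDL :=
  files.foldl (pvLeafStep fns files) (PySem.Dict.mk [])
def pvFilesOf (models : pvM) (m : String) : pvL := (PySem.Dict.mk models).getD m []
def pvCB (fns : List String) (models : pvM) (q : String × pvL) : Bool :=
  !((pvFilesOf models q.1).all fun r => !pvC fns r)
def pvBstep (fns : List String) (models : pvM) (inner : pvDM) (q : String × pvL) : pvDM :=
  if (pvFiltered fns (pvFilesOf models q.1)).items.isEmpty then inner
  else inner.insert q.1 (pvFiltered fns (pvFilesOf models q.1)).items
def pvBin (fns : List String) (models : pvM) : pvDM :=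
  models.foldl (pvBstep fns models) (PySem.Dict.mk [])
def pvTopBstep (fns : List String) (stats : pvS) (acc : pvDS) (p : String × pvM) : pvDS :=
  if (pvBin fns ((PySem.Dict.mk stats).getD p.1 [])).items.isEmpty then acc
  else acc.insert p.1 (pvBin fns ((PySem.Dict.mk stats).getD p.1 [])).items
def pvJstep (m : String) (files : pvL) (j : pvM) (r : String × Int) : pvM :=
  ((PySem.Dict.mk j).insert m
    ((PySem.Dict.mk ((PySem.Dict.mk j).getD m [])).insert r.1 (pvVal files r.1)).items).items
def pvJfold (fns : List String) (m : String) (files : pvL) (j : pvM) : pvM :=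
  files.foldl (fun j r => if pvC fns r then pvJstep m files j r else j) j
def pvTopAstep (fns : List String) (stats : pvS) (ns : pvDS) (p : String × pvM) : pvDS :=
  ((PySem.Dict.mk stats).getD p.1 []).foldl
    (pvA_modelstep fns p.1 ((PySem.Dict.mk stats).getD p.1 [])) ns

-- B-port identification
theorem pv_contains_ofList (fns : List String) (x : String) :
    PySem.Set.contains (PySem.Set.ofList fns) x = fns.contains x := by
  rw [PySem.Set.contains_eq_listContains]
  by_cases h : x ∈ fns
  · simp [List.contains_eq_mem, PySem.Set.mem_ofList, h]
  · simp [List.contains_eq_mem, PySem.Set.mem_ofList, h]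

theorem pvPrune0_eq (fns : List String) (files : pvL) :
    pvPrune0 (PySem.Set.ofList fns) files = pvFiltered fns files := by
  unfold pvPrune0 pvFiltered
  apply PySem.List.foldl_congr_mem
  intro acc r _
  rw [pv_contains_ofList]
  rfl

theorem pvPrune1_eq (fns : List String) (models : pvM) :
    pvPrune1 (PySem.Set.ofList fns) models = pvBin fns models := by
  unfold pvPrune1 pvBin
  apply PySem.List.foldl_congr_mem
  intro acc q _
  simp only [pvPrune0_eq]
  rfl

theorem pvB_port_eq (stats : pvS) (fns : List String) :
    filter_filename_in_stats_alt stats fns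
      = (stats.foldl (pvTopBstep fns stats) (PySem.Dict.mk [])).items := by
  unfold filter_filename_in_stats_alt pvPrune2
  congr 1
  apply PySem.List.foldl_congr_mem
  intro acc p _
  simp only [pvPrune1_eq]
  rfl

-- A-step normal forms
theorem pvA_leafstep_eq (fns : List String) (k m : String) (files : pvL)
    (ns : pvDS) (r : String × Int) :
    pvA_leafstep fns k m files ns r =
      if pvC fns r then
        ns.insert k (PySem.Dict.mk (pvJstep m files (ns.getD k []) r)).items
      else ns := by
  unfold pvA_leafstep pvC pvJstep pvVal
  by_cases hc : fns.contains r.1 = true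
  · simp only [hc, if_true]
    by_cases hk : ns.contains k = true
    · simp only [hk, if_true]
      by_cases hm : (PySem.Dict.mk (ns.getD k [])).contains m = true
      · simp only [hm, if_true]
      · have hm' := eq_false_of_ne_true hm
        simp only [hm', Bool.false_eq_true, if_false, PySem.Dict.getD_insert_self,
          PySem.Dict.getD_of_not_contains _ _ hm', PySem.Dict.insert_insert_self]
    · have hk' := eq_false_of_ne_true hk
      simp only [hk', Bool.false_eq_true, if_false, PySem.Dict.getD_insert_self,
        PySem.Dict.getD_of_not_contains _ _ hk']
      have hm0 : (PySem.Dict.mk ([] : List (String × List (String × Int)))).contains m = false := by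
        simp [PySem.Dict.contains_mk]
      simp only [hm0, Bool.false_eq_true, if_false, PySem.Dict.getD_insert_self,
        PySem.Dict.getD_of_not_contains _ _ hm0, PySem.Dict.insert_insert_self]
  · have hc' := eq_false_of_ne_true hc
    simp only [hc', Bool.false_eq_true, if_false]

theorem pvA_modelstep_eq (fns : List String) (k : String) (models : pvM)
    (ns : pvDS) (q : String × pvL) :
    pvA_modelstep fns k models ns q =
      if pvCB fns models q then
        ns.insert k (pvJfold fns q.1 (pvFilesOf models q.1) (ns.getD k []))
      else ns := by
  unfold pvA_modelstep
  dsimp only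
  rw [PySem.List.foldl_congr_mem _ _
      (fun ns r => if pvC fns r then
        ns.insert k (pvJstep q.1 ((PySem.Dict.mk models).getD q.1 []) (ns.getD k []) r)
      else ns) _
      (fun acc r _ => by rw [pvA_leafstep_eq])]
  rw [pv_loc ((PySem.Dict.mk models).getD q.1 []) (pvC fns)
      (pvJstep q.1 ((PySem.Dict.mk models).getD q.1 [])) k ns]
  unfold pvCB pvFilesOf pvJfold
  cases hall : ((PySem.Dict.mk models).getD q.1 []).all fun r => !pvC fns r <;> simp

-- leaf level
theorem pvLeafFold_get? (fns : List String) (files : pvL) :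
    ∀ (rest : pvL) (d : pvDL) (f : String),
      (rest.foldl (pvLeafStep fns files) d).get? f =
        if (rest.any fun r => r.1 == f) && fns.contains f then some (pvVal files f)
        else d.get? f := by
  intro rest
  induction rest with
  | nil => intro d f; simp
  | cons r rest ih =>
    intro d f
    rw [List.foldl_cons, ih]
    by_cases hc : pvC fns r = true
    · have hd' : pvLeafStep fns files d r = d.insert r.1 (pvVal files r.1) := by
        unfold pvLeafStep; rw [if_pos hc]
      by_cases hf : r.1 = f
      · have hcf : fns.contains f = true := by rw [← hf]; exact hc
        have hget : (d.insert r.1 (pvVal files r.1)).get? f = some (pvVal files f) := by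
          rw [PySem.Dict.get?_insert]
          simp [hf]
        rw [hd', hget]
        simp only [List.any_cons, hf, beq_self_eq_true, Bool.true_or, hcf,
          Bool.and_true, if_true, ite_self]
      · have hne : (r.1 == f) = false := by simpa using hf
        have hget : (d.insert r.1 (pvVal files r.1)).get? f = d.get? f := by
          rw [PySem.Dict.get?_insert]
          exact if_neg (fun h => hf h.symm)
        rw [hd', hget]
        simp only [List.any_cons, hne, Bool.false_or]
    · have hc' := eq_false_of_ne_true hc
      have hd' : pvLeafStep fns files d r = d := by unfold pvLeafStep; rw [if_neg hc]
      rw [hd']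
      by_cases hf : r.1 = f
      · have hcf : fns.contains f = false := by rw [← hf]; exact hc'
        simp only [hcf, Bool.and_false, Bool.false_eq_true, if_false]
      · have hne : (r.1 == f) = false := by simpa using hf
        simp only [List.any_cons, hne, Bool.false_or]

theorem pvFiltered_get? (fns : List String) (files : pvL) (f : String) :
    (pvFiltered fns files).get? f =
      if (files.any fun r => r.1 == f) && fns.contains f then some (pvVal files f)
      else none := by
  unfold pvFiltered
  rw [pvLeafFold_get? fns files files (PySem.Dict.mk []) f]
  rfl

theorem pvFiltered_nodup (fns : List String) (files : pvL) :
    (pvFiltered fns files).keys.Nodup := by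
  unfold pvFiltered pvLeafStep
  rw [PySem.List.foldl_if_eq_foldl_filter (pvC fns)
      (fun (d : pvDL) (r : String × Int) => d.insert r.1 (pvVal files r.1))]
  exact PySem.Dict.nodup_keys_foldl_insert_key _ (fun (r : String × Int) => r.1)
    (fun (_ : pvDL) (r : String × Int) => pvVal files r.1) _ (by simp)

theorem pvFiltered_empty_iff (fns : List String) (files : pvL) :
    (pvFiltered fns files).items.isEmpty = (files.all fun r => !pvC fns r) := by
  have heq : pvFiltered fns files
      = (files.filter (pvC fns)).foldl
          (fun (d : pvDL) (r : String × Int) => d.insert r.1 (pvVal files r.1))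
          (PySem.Dict.mk []) := by
    unfold pvFiltered pvLeafStep
    exact PySem.List.foldl_if_eq_foldl_filter (pvC fns) _ _ _
  have hkeys : (pvFiltered fns files).keys
      = PySem.Set.ofList ((files.filter (pvC fns)).map (fun r => r.1)) := by
    rw [heq, PySem.Dict.keys_foldl_insert_key _ (fun (r : String × Int) => r.1)
      (fun _ r => pvVal files r.1)]
    simp [PySem.Set.update_nil_left]
  have hitems : (pvFiltered fns files).items = [] ↔ files.filter (pvC fns) = [] := by
    constructor
    · intro h
      have hk0 : (pvFiltered fns files).keys = [] := by simp [PySem.Dict.keys, h]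
      rw [hkeys] at hk0
      rcases hf : files.filter (pvC fns) with _ | ⟨x, l⟩
      · rfl
      · rw [hf, List.map_cons, PySem.Set.ofList_cons] at hk0
        simp at hk0
    · intro h
      have h2 : (pvFiltered fns files).keys = [] := by rw [hkeys, h]; rfl
      simp only [PySem.Dict.keys] at h2
      exact List.map_eq_nil_iff.mp h2
  rw [Bool.eq_iff_iff, List.isEmpty_iff, hitems, List.filter_eq_nil_iff, List.all_eq_true]
  constructor
  · intro h r hr
    simpa using h r hr
  · intro h r hr
    simpa using h r hr

theorem pvLeafFold_refold (fns : List String) (files : pvL) :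
    ∀ (rest : pvL) (d : pvDL), d.keys.Nodup →
      (∀ r ∈ rest, pvC fns r = true → d.get? r.1 = some (pvVal files r.1)) →
      rest.foldl (pvLeafStep fns files) d = d := by
  intro rest
  induction rest with
  | nil => intro d _ _; rfl
  | cons r rest ih =>
    intro d hnd h
    simp only [List.foldl_cons, pvLeafStep]
    by_cases hc : pvC fns r = true
    · rw [if_pos hc, pv_insert_eq_self _ _ _ hnd (h r (by simp) hc)]
      exact ih d hnd (fun r' hr' => h r' (by simp [hr']))
    · rw [if_neg hc]
      exact ih d hnd (fun r' hr' => h r' (by simp [hr']))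

-- model level
theorem pvBinFold_get? (fns : List String) (models : pvM) :
    ∀ (rest : pvM) (inner : pvDM) (m : String),
      (rest.foldl (pvBstep fns models) inner).get? m =
        if (rest.any fun q => q.1 == m)
            && !(pvFiltered fns (pvFilesOf models m)).items.isEmpty
        then some (pvFiltered fns (pvFilesOf models m)).items
        else inner.get? m := by
  intro rest
  induction rest with
  | nil => intro inner m; simp
  | cons q rest ih =>
    intro inner m
    rw [List.foldl_cons, ih]
    cases he : (pvFiltered fns (pvFilesOf models q.1)).items.isEmpty
    · have hd' : pvBstep fns models inner q
          = inner.insert q.1 (pvFiltered fns (pvFilesOf models q.1)).items := by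
        unfold pvBstep; rw [if_neg (by simp [he])]
      by_cases hqm : q.1 = m
      · have hem : (pvFiltered fns (pvFilesOf models m)).items.isEmpty = false := by
          rw [← hqm]; exact he
        have hget : (inner.insert q.1 (pvFiltered fns (pvFilesOf models q.1)).items).get? m
            = some (pvFiltered fns (pvFilesOf models m)).items := by
          rw [PySem.Dict.get?_insert]
          simp [hqm]
        rw [hd', hget]
        simp only [List.any_cons, hqm, beq_self_eq_true, Bool.true_or, hem,
          Bool.not_false, Bool.and_true, if_true, ite_self]
      · have hne : (q.1 == m) = false := by simpa using hqm
        have hget : (inner.insert q.1 (pvFiltered fns (pvFilesOf models q.1)).items).get? m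
            = inner.get? m := by
          rw [PySem.Dict.get?_insert]
          exact if_neg (fun h => hqm h.symm)
        rw [hd', hget]
        simp only [List.any_cons, hne, Bool.false_or]
    · have hd' : pvBstep fns models inner q = inner := by
        unfold pvBstep; rw [if_pos he]
      rw [hd']
      by_cases hqm : q.1 = m
      · have hem : (pvFiltered fns (pvFilesOf models m)).items.isEmpty = true := by
          rw [← hqm]; exact he
        simp only [hem, Bool.not_true, Bool.and_false, Bool.false_eq_true, if_false]
      · have hne : (q.1 == m) = false := by simpa using hqm
        simp only [List.any_cons, hne, Bool.false_or]

theorem pvBin_get? (fns : List String) (models : pvM) (m : String) :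
    (pvBin fns models).get? m =
      if (models.any fun q => q.1 == m)
          && !(pvFiltered fns (pvFilesOf models m)).items.isEmpty
      then some (pvFiltered fns (pvFilesOf models m)).items
      else none := by
  unfold pvBin
  rw [pvBinFold_get? fns models models (PySem.Dict.mk []) m]
  rfl

theorem pvBin_nodup (fns : List String) (models : pvM) :
    (pvBin fns models).keys.Nodup := by
  unfold pvBin
  rw [PySem.List.foldl_congr_mem _ _
      (fun (inner : pvDM) (q : String × pvL) =>
        if (!(pvFiltered fns (pvFilesOf models q.1)).items.isEmpty) = true then
          inner.insert q.1 (pvFiltered fns (pvFilesOf models q.1)).items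
        else inner) _
      (fun acc q _ => by
        unfold pvBstep
        cases he : (pvFiltered fns (pvFilesOf models q.1)).items.isEmpty <;> simp [he])]
  rw [PySem.List.foldl_if_eq_foldl_filter
      (fun (q : String × pvL) => !(pvFiltered fns (pvFilesOf models q.1)).items.isEmpty)
      (fun (inner : pvDM) (q : String × pvL) =>
        inner.insert q.1 (pvFiltered fns (pvFilesOf models q.1)).items)]
  exact PySem.Dict.nodup_keys_foldl_insert_key _ (fun (q : String × pvL) => q.1)
    (fun (_ : pvDM) (q : String × pvL) => (pvFiltered fns (pvFilesOf models q.1)).items)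
    _ (by simp)

theorem pvBin_empty_iff (fns : List String) (models : pvM) :
    (pvBin fns models).items.isEmpty
      = (models.all fun q => (pvFiltered fns (pvFilesOf models q.1)).items.isEmpty) := by
  have heq : pvBin fns models
      = (models.filter
          (fun (q : String × pvL) => !(pvFiltered fns (pvFilesOf models q.1)).items.isEmpty)).foldl
          (fun (inner : pvDM) (q : String × pvL) =>
            inner.insert q.1 (pvFiltered fns (pvFilesOf models q.1)).items)
          (PySem.Dict.mk []) := by
    unfold pvBin
    rw [PySem.List.foldl_congr_mem _ _
        (fun (inner : pvDM) (q : String × pvL) =>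
          if (!(pvFiltered fns (pvFilesOf models q.1)).items.isEmpty) = true then
            inner.insert q.1 (pvFiltered fns (pvFilesOf models q.1)).items
          else inner) _
        (fun acc q _ => by
          unfold pvBstep
          cases he : (pvFiltered fns (pvFilesOf models q.1)).items.isEmpty <;> simp [he])]
    exact PySem.List.foldl_if_eq_foldl_filter _ _ _ _
  have hkeys : (pvBin fns models).keys
      = PySem.Set.ofList ((models.filter
          (fun (q : String × pvL) => !(pvFiltered fns (pvFilesOf models q.1)).items.isEmpty)).map
          (fun q => q.1)) := by
    rw [heq, PySem.Dict.keys_foldl_insert_key _ (fun (q : String × pvL) => q.1)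
      (fun (_ : pvDM) (q : String × pvL) => (pvFiltered fns (pvFilesOf models q.1)).items)]
    simp [PySem.Set.update_nil_left]
  have hitems : (pvBin fns models).items = []
      ↔ models.filter
          (fun (q : String × pvL) => !(pvFiltered fns (pvFilesOf models q.1)).items.isEmpty) = [] := by
    constructor
    · intro h
      have hk0 : (pvBin fns models).keys = [] := by simp [PySem.Dict.keys, h]
      rw [hkeys] at hk0
      rcases hf : models.filter
          (fun (q : String × pvL) => !(pvFiltered fns (pvFilesOf models q.1)).items.isEmpty)
        with _ | ⟨x, l⟩
      · rfl
      · rw [hf, List.map_cons, PySem.Set.ofList_cons] at hk0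
        simp at hk0
    · intro h
      have h2 : (pvBin fns models).keys = [] := by rw [hkeys, h]; rfl
      simp only [PySem.Dict.keys] at h2
      exact List.map_eq_nil_iff.mp h2
  rw [Bool.eq_iff_iff, List.isEmpty_iff, hitems, List.filter_eq_nil_iff, List.all_eq_true]
  constructor
  · intro h q hq
    simpa using h q hq
  · intro h q hq
    simpa using h q hq

theorem pvBstep_refold (fns : List String) (models : pvM) :
    ∀ (rest : pvM) (inner : pvDM), inner.keys.Nodup →
      (∀ q ∈ rest, (pvFiltered fns (pvFilesOf models q.1)).items.isEmpty = false →
        inner.get? q.1 = some (pvFiltered fns (pvFilesOf models q.1)).items) →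
      rest.foldl (pvBstep fns models) inner = inner := by
  intro rest
  induction rest with
  | nil => intro inner _ _; rfl
  | cons q rest ih =>
    intro inner hnd h
    rw [List.foldl_cons]
    have hstep : pvBstep fns models inner q = inner := by
      unfold pvBstep
      cases he : (pvFiltered fns (pvFilesOf models q.1)).items.isEmpty
      · rw [if_neg (by simp), pv_insert_eq_self _ _ _ hnd (h q (by simp) he)]
      · simp
    rw [hstep]
    exact ih inner hnd (fun q' hq' => h q' (by simp [hq']))

def pvAstepD (fns : List String) (models : pvM) (d : pvDM) (q : String × pvL) : pvDM :=
  if pvCB fns models q then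
    PySem.Dict.mk (pvJfold fns q.1 (pvFilesOf models q.1) d.items)
  else d

def pvInv2 (fns : List String) (models : pvM) (inner : pvDM) : Prop :=
  ∀ m, inner.get? m = none
    ∨ inner.get? m = some (pvFiltered fns (pvFilesOf models m)).items

theorem pvJfold_eq (fns : List String) (m : String) (files : pvL) (d : pvDM)
    (hne : (files.all fun r => !pvC fns r) = false) :
    pvJfold fns m files d.items
      = (d.insert m
          ((files.foldl (pvLeafStep fns files)
            (PySem.Dict.mk (d.getD m []))).items)).items := by
  unfold pvJfold
  rw [PySem.List.foldl_congr_mem _ _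
      (fun (j : pvM) (r : String × Int) =>
        ((fun (dd : pvDM) (r : String × Int) =>
            if pvC fns r then
              dd.insert m ((PySem.Dict.mk (dd.getD m [])).insert r.1 (pvVal files r.1)).items
            else dd) (PySem.Dict.mk j) r).items) _
      (fun acc r _ => by
        by_cases hc : pvC fns r = true
        · simp only [hc, if_true, pvJstep]
        · simp only [eq_false_of_ne_true hc, Bool.false_eq_true, if_false])]
  rw [pv_foldl_conj files
      (fun (dd : pvDM) (r : String × Int) =>
        if pvC fns r then
          dd.insert m ((PySem.Dict.mk (dd.getD m [])).insert r.1 (pvVal files r.1)).items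
        else dd) d.items]
  rw [pv_loc files (pvC fns)
      (fun (v : pvL) (r : String × Int) => ((PySem.Dict.mk v).insert r.1 (pvVal files r.1)).items)
      m (PySem.Dict.mk d.items)]
  rw [if_neg (by simp [hne])]
  rw [PySem.List.foldl_congr_mem _ _
      (fun (v : pvL) (r : String × Int) => (pvLeafStep fns files (PySem.Dict.mk v) r).items) _
      (fun acc r _ => by
        unfold pvLeafStep
        by_cases hc : pvC fns r = true
        · simp only [hc, if_true]
        · simp only [eq_false_of_ne_true hc, Bool.false_eq_true, if_false])]
  show (d.insert m
      (files.foldl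
        (fun (v : pvL) (r : String × Int) => (pvLeafStep fns files (PySem.Dict.mk v) r).items)
        (d.getD m []))).items = _
  rw [pv_foldl_conj files (pvLeafStep fns files) (d.getD m [])]


theorem pvAstepD_eq_pvBstep (fns : List String) (models : pvM) (inner : pvDM)
    (q : String × pvL) (hinv : pvInv2 fns models inner) :
    pvAstepD fns models inner q = pvBstep fns models inner q := by
  have hcb : pvCB fns models q = !(pvFiltered fns (pvFilesOf models q.1)).items.isEmpty := by
    unfold pvCB
    rw [pvFiltered_empty_iff]
  unfold pvAstepD pvBstep
  cases he : (pvFiltered fns (pvFilesOf models q.1)).items.isEmpty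
  · rw [if_pos (show pvCB fns models q = true by rw [hcb, he]; rfl),
      if_neg (show ¬(false = true) by simp)]
    have hne : ((pvFilesOf models q.1).all fun r => !pvC fns r) = false := by
      rw [← pvFiltered_empty_iff, he]
    rw [pvJfold_eq fns q.1 (pvFilesOf models q.1) inner hne]
    show inner.insert q.1
        ((pvFilesOf models q.1).foldl (pvLeafStep fns (pvFilesOf models q.1))
          (PySem.Dict.mk (inner.getD q.1 []))).items = _
    rcases hinv q.1 with hnone | hsome
    · rw [PySem.Dict.getD_eq_get?_getD, hnone]
      rfl
    · rw [PySem.Dict.getD_eq_get?_getD, hsome]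
      have hrefold : (pvFilesOf models q.1).foldl (pvLeafStep fns (pvFilesOf models q.1))
          (pvFiltered fns (pvFilesOf models q.1)) = pvFiltered fns (pvFilesOf models q.1) := by
        apply pvLeafFold_refold fns (pvFilesOf models q.1) (pvFilesOf models q.1) _
          (pvFiltered_nodup fns (pvFilesOf models q.1))
        intro r hr hcr
        have hany : ((pvFilesOf models q.1).any fun r' => r'.1 == r.1) = true :=
          List.any_eq_true.mpr ⟨r, hr, by simp⟩
        have hcr' : fns.contains r.1 = true := hcr
        rw [pvFiltered_get?, if_pos (by rw [hany, hcr']; rfl)]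
      show inner.insert q.1
          ((pvFilesOf models q.1).foldl (pvLeafStep fns (pvFilesOf models q.1))
            (pvFiltered fns (pvFilesOf models q.1))).items = _
      rw [hrefold]
  · rw [if_neg (show ¬(pvCB fns models q = true) by rw [hcb, he]; simp),
      if_pos (show true = true from rfl)]

theorem pvModelFold_eq (fns : List String) (models : pvM) :
    ∀ (rest : pvM) (inner : pvDM), pvInv2 fns models inner →
      rest.foldl (pvAstepD fns models) inner = rest.foldl (pvBstep fns models) inner := by
  intro rest
  induction rest with
  | nil => intro inner _; rfl
  | cons q rest ih =>
    intro inner hinv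
    rw [List.foldl_cons, List.foldl_cons, pvAstepD_eq_pvBstep fns models inner q hinv]
    apply ih
    intro m
    unfold pvBstep
    cases he : (pvFiltered fns (pvFilesOf models q.1)).items.isEmpty
    · rw [if_neg (by simp), PySem.Dict.get?_insert]
      by_cases hm : m = q.1
      · right
        rw [if_pos hm, hm]
      · rw [if_neg hm]
        exact hinv m
    · rw [if_pos rfl]
      exact hinv m

theorem pvInnerA_eq (fns : List String) (models : pvM) (j0 : pvM)
    (h : j0 = [] ∨ j0 = (pvBin fns models).items) :
    models.foldl
        (fun j q => if pvCB fns models q then pvJfold fns q.1 (pvFilesOf models q.1) j else j)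
        j0
      = (pvBin fns models).items := by
  have hconj : models.foldl
        (fun j q => if pvCB fns models q then pvJfold fns q.1 (pvFilesOf models q.1) j else j)
        j0
      = (models.foldl (pvAstepD fns models) (PySem.Dict.mk j0)).items := by
    rw [PySem.List.foldl_congr_mem _ _
        (fun (j : pvM) (q : String × pvL) => (pvAstepD fns models (PySem.Dict.mk j) q).items) _
        (fun acc q _ => by
          unfold pvAstepD
          by_cases hcb : pvCB fns models q = true
          · simp only [hcb, if_true]
          · simp only [eq_false_of_ne_true hcb, Bool.false_eq_true, if_false])]
    exact pv_foldl_conj models (pvAstepD fns models) j0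
  rcases h with h0 | hbin
  · subst h0
    rw [hconj, pvModelFold_eq fns models models (PySem.Dict.mk [])
        (fun m => Or.inl rfl)]
    rfl
  · subst hbin
    rw [hconj]
    have hinv : pvInv2 fns models (pvBin fns models) := by
      intro m
      rw [pvBin_get?]
      cases hcond : (models.any fun q => q.1 == m)
          && !(pvFiltered fns (pvFilesOf models m)).items.isEmpty
      · left
        rw [if_neg (by simp)]
      · right
        rw [if_pos rfl]
    show (models.foldl (pvAstepD fns models) (pvBin fns models)).items = _
    rw [pvModelFold_eq fns models models (pvBin fns models) hinv]
    rw [pvBstep_refold fns models models (pvBin fns models) (pvBin_nodup fns models)]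
    intro q hq hne
    have hany : (models.any fun q' => q'.1 == q.1) = true :=
      List.any_eq_true.mpr ⟨q, hq, by simp⟩
    rw [pvBin_get?, if_pos (by rw [hany, hne]; rfl)]

-- top level
def pvInv1 (fns : List String) (stats : pvS) (ns : pvDS) : Prop :=
  ∀ k, ns.get? k = none
    ∨ ns.get? k = some (pvBin fns ((PySem.Dict.mk stats).getD k [])).items

theorem pvTopAstep_eq (fns : List String) (stats : pvS) (ns : pvDS) (p : String × pvM)
    (hinv : pvInv1 fns stats ns) :
    pvTopAstep fns stats ns p = pvTopBstep fns stats ns p := by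
  unfold pvTopAstep
  rw [PySem.List.foldl_congr_mem _ _
      (fun (ns : pvDS) (q : String × pvL) =>
        if pvCB fns ((PySem.Dict.mk stats).getD p.1 []) q then
          ns.insert p.1
            (pvJfold fns q.1 (pvFilesOf ((PySem.Dict.mk stats).getD p.1 []) q.1) (ns.getD p.1 []))
        else ns) _
      (fun acc q _ => by rw [pvA_modelstep_eq])]
  rw [pv_loc ((PySem.Dict.mk stats).getD p.1 [])
      (pvCB fns ((PySem.Dict.mk stats).getD p.1 []))
      (fun (j : pvM) (q : String × pvL) =>
        pvJfold fns q.1 (pvFilesOf ((PySem.Dict.mk stats).getD p.1 []) q.1) j)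
      p.1 ns]
  have hall : (((PySem.Dict.mk stats).getD p.1 []).all
        fun q => !pvCB fns ((PySem.Dict.mk stats).getD p.1 []) q)
      = (pvBin fns ((PySem.Dict.mk stats).getD p.1 [])).items.isEmpty := by
    rw [pvBin_empty_iff]
    congr 1
    funext q
    unfold pvCB
    rw [Bool.not_not, pvFiltered_empty_iff]
  rw [hall]
  unfold pvTopBstep
  cases hemp : (pvBin fns ((PySem.Dict.mk stats).getD p.1 [])).items.isEmpty
  · rw [if_neg (show ¬(false = true) by simp), if_neg (show ¬(false = true) by simp)]
    congr 1
    apply pvInnerA_eq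
    rcases hinv p.1 with hnone | hsome
    · left
      rw [PySem.Dict.getD_eq_get?_getD, hnone]
      rfl
    · right
      rw [PySem.Dict.getD_eq_get?_getD, hsome]
      rfl
  · rw [if_pos (show true = true from rfl), if_pos (show true = true from rfl)]

theorem pvTopFold_eq (fns : List String) (stats : pvS) :
    ∀ (rest : pvS) (ns : pvDS), pvInv1 fns stats ns →
      rest.foldl (pvTopAstep fns stats) ns = rest.foldl (pvTopBstep fns stats) ns := by
  intro rest
  induction rest with
  | nil => intro ns _; rfl
  | cons p rest ih =>
    intro ns hinv
    rw [List.foldl_cons, List.foldl_cons, pvTopAstep_eq fns stats ns p hinv]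
    apply ih
    intro k
    unfold pvTopBstep
    cases he : (pvBin fns ((PySem.Dict.mk stats).getD p.1 [])).items.isEmpty
    · rw [if_neg (by simp), PySem.Dict.get?_insert]
      by_cases hk : k = p.1
      · right
        rw [if_pos hk, hk]
      · rw [if_neg hk]
        exact hinv k
    · rw [if_pos rfl]
      exact hinv k

theorem pvA_port_eq (stats : pvS) (fns : List String) :
    filter_filename_in_stats stats fns
      = (stats.foldl (pvTopAstep fns stats) (PySem.Dict.mk [])).items := by
  rfl

-- ===== VERDICT (by name: the statement is the Claim_ definition above) =====
theorem filter_filename_in_stats_spec : Claim_equal_filter_filename_in_stats := by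
  intro stats fns _
  unfold Spec_filter_filename_in_stats
  rw [pvA_port_eq, pvB_port_eq,
    pvTopFold_eq fns stats stats (PySem.Dict.mk []) (fun k => Or.inl rfl)]
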